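-- pv_equiv track=rewrite | github.com/jfabienke/ghidra-i860 | corpus/ndserver/scripts/generate_all_function_docs.py | format_hardware_access
-- ===== SOURCE A (Python) =====
-- from typing import Dict, List, Optional
--
-- def format_hardware_access(hw_accesses: List[dict]) -> str:
--     """Format hardware access section"""
--     if not hw_accesses:
--         return """### Hardware Registers Accessed
--
-- **None** - This function does not directly access any hardware registers.
--
-- **Rationale**:
-- - No memory-mapped I/O addresses in range `0x02000000-0x02FFFFFF` (NeXT hardware registers)
-- - No NeXTdimension MMIO in range `0xF8000000-0xFFFFFFFF` (ND RAM/VRAM/registers)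
-- - Pure software function operating on RAM-based data structures
-- """
--
--     output = ["### Hardware Registers Accessed\n"]
--
--     # Group by region
--     by_region = {}
--     for access in hw_accesses:
--         region = access.get('region', 'UNKNOWN')
--         if region not in by_region:
--             by_region[region] = []
--         by_region[region].append(access)
--
--     for region, accesses in sorted(by_region.items()):
--         output.append(f"**{region}**:")
--         for access in accesses[:10]:  # Limit to 10 per region
--             reg_name = access.get('register_name', 'UNKNOWN')
--             hw_addr = access.get('hardware_address_hex', '???')
--             access_type = access.get('access_type', 'read')
--             instr = access.get('instruction', '???')
--             output.append(f"- `{hw_addr}` ({reg_name}) - {access_type.upper()} via `{instr}`")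
--
--         if len(accesses) > 10:
--             output.append(f"- ... and {len(accesses) - 10} more accesses\n")
--         else:
--             output.append("")
--
--     return '\n'.join(output)
-- ===== SOURCE B (Python) =====
-- # B: instead of grouping into a dict and sorting its items, compute the sorted set of
-- # region keys and emit each region's block by filtering the original list per region.
--
-- def _region_key(access):
--     return access.get('region', 'UNKNOWN')
--
--
-- def _access_line(access):
--     return (f"- `{access.get('hardware_address_hex', '???')}` "
--             f"({access.get('register_name', 'UNKNOWN')}) - "
--             f"{access.get('access_type', 'read').upper()} "
--             f"via `{access.get('instruction', '???')}`")
--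
--
-- def _region_lines(region, accesses):
--     lines = [f"**{region}**:"]
--     lines += [_access_line(a) for a in accesses[:10]]
--     extra = len(accesses) - 10
--     lines.append(f"- ... and {extra} more accesses\n" if extra > 0 else "")
--     return lines
--
--
-- def format_hardware_access(hw_accesses):
--     """Format hardware access section"""
--     if not hw_accesses:
--         return """### Hardware Registers Accessed
--
-- **None** - This function does not directly access any hardware registers.
--
-- **Rationale**:
-- - No memory-mapped I/O addresses in range `0x02000000-0x02FFFFFF` (NeXT hardware registers)
-- - No NeXTdimension MMIO in range `0xF8000000-0xFFFFFFFF` (ND RAM/VRAM/registers)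
-- - Pure software function operating on RAM-based data structures
-- """
--     lines = ["### Hardware Registers Accessed\n"]
--     for region in sorted({_region_key(a) for a in hw_accesses}):
--         lines += _region_lines(region, [a for a in hw_accesses if _region_key(a) == region])
--     return '\n'.join(lines)
-- ===== Notes on version B (the rewrite author's own statement) =====
-- stated objective: alternative
-- what changed: B drops A's dict-grouping pass entirely: it sorts the set of region keys and emits each region's block by filtering the original list per region, with the per-region formatting factored into helpers.
import Mathlib
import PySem

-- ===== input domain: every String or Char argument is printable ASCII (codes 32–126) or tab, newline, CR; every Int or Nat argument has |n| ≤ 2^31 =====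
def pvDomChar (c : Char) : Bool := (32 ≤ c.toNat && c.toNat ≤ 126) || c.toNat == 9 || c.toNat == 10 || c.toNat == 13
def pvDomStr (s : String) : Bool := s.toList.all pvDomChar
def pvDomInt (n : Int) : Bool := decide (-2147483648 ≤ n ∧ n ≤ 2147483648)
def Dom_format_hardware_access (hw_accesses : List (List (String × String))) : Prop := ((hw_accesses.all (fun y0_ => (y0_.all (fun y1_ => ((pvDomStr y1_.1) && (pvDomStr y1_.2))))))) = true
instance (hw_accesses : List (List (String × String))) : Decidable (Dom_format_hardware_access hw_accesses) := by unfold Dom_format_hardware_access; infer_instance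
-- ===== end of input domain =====

-- B reworks the decomposition: no dict-grouping pass; it sorts the set of region keys and
-- filters the input per region (an alternative of similar cost, not claimed faster).

-- the literal returned by both Pythons on an empty list (shared string constant)
def fhaNoneSection : String :=
  "### Hardware Registers Accessed\n\n**None** - This function does not directly access any hardware registers.\n\n**Rationale**:\n- No memory-mapped I/O addresses in range `0x02000000-0x02FFFFFF` (NeXT hardware registers)\n- No NeXTdimension MMIO in range `0xF8000000-0xFFFFFFFF` (ND RAM/VRAM/registers)\n- Pure software function operating on RAM-based data structures\n"

-- ===== PORT A =====
-- A has no helpers; everything is inline, as in the Python.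
-- sorted(by_region.items()) compares tuples componentwise; the dict's keys are unique, so the
-- first component alone decides the order — ported as sorting by the key string.
def format_hardware_access (hw_accesses : List (List (String × String))) : String :=
  if hw_accesses = [] then
    fhaNoneSection
  else
    let output : List String := ["### Hardware Registers Accessed\n"]
    let by_region : PySem.Dict String (List (List (String × String))) :=
      hw_accesses.foldl (fun d access =>
        let region := PySem.Dict.getD (PySem.Dict.mk access) "region" "UNKNOWN"
        let d := if d.contains region then d else d.insert region []
        d.insert region (d.getD region [] ++ [access])) PySem.Dict.empty
    let output := (PySem.List.sorted by_region.items (fun p => p.1)).foldl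
      (fun output p =>
        let region := p.1
        let accesses := p.2
        let output := output ++ ["**" ++ region ++ "**:"]
        let output := (PySem.List.slice accesses none (some 10)).foldl (fun output access =>
          let reg_name := PySem.Dict.getD (PySem.Dict.mk access) "register_name" "UNKNOWN"
          let hw_addr := PySem.Dict.getD (PySem.Dict.mk access) "hardware_address_hex" "???"
          let access_type := PySem.Dict.getD (PySem.Dict.mk access) "access_type" "read"
          let instr := PySem.Dict.getD (PySem.Dict.mk access) "instruction" "???"
          output ++ ["- `" ++ hw_addr ++ "` (" ++ reg_name ++ ") - " ++
            PySem.Str.upper access_type ++ " via `" ++ instr ++ "`"]) output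
        if ((accesses.length : Int) > 10) then
          output ++ ["- ... and " ++ PySem.Int.toStr ((accesses.length : Int) - 10) ++ " more accesses\n"]
        else
          output ++ [""]) output
    PySem.Str.join "\n" output

-- ===== PORT B =====
def fhaRegionKey (access : List (String × String)) : String :=
  PySem.Dict.getD (PySem.Dict.mk access) "region" "UNKNOWN"

def fhaAccessLine (access : List (String × String)) : String :=
  "- `" ++ PySem.Dict.getD (PySem.Dict.mk access) "hardware_address_hex" "???" ++ "` (" ++
    PySem.Dict.getD (PySem.Dict.mk access) "register_name" "UNKNOWN" ++ ") - " ++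
    PySem.Str.upper (PySem.Dict.getD (PySem.Dict.mk access) "access_type" "read") ++ " via `" ++
    PySem.Dict.getD (PySem.Dict.mk access) "instruction" "???" ++ "`"

def fhaRegionLines (region : String) (accesses : List (List (String × String))) : List String :=
  (["**" ++ region ++ "**:"] ++ (accesses.take 10).map fhaAccessLine) ++
    [if ((accesses.length : Int) - 10 > 0) then
        "- ... and " ++ PySem.Int.toStr ((accesses.length : Int) - 10) ++ " more accesses\n"
      else ""]

-- sorted({...}) iterates a set only through sorted without a key: order-independent
def format_hardware_access_alt (hw_accesses : List (List (String × String))) : String :=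
  if hw_accesses = [] then
    fhaNoneSection
  else
    PySem.Str.join "\n"
      (["### Hardware Registers Accessed\n"] ++
        (PySem.List.sorted (PySem.Set.ofList (hw_accesses.map fhaRegionKey)) (fun r => r)).flatMap
          (fun region => fhaRegionLines region (hw_accesses.filter (fun a => fhaRegionKey a == region))))

-- ===== PRECONDITION & SPEC =====
def Spec_format_hardware_access (hw_accesses : List (List (String × String))) (out : String) : Prop := out = format_hardware_access_alt hw_accesses
instance (hw_accesses : List (List (String × String))) (out : String) : Decidable (Spec_format_hardware_access hw_accesses out) := by unfold Spec_format_hardware_access; infer_instance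

-- ===== CLAIM (what is proved, stated in full; the proofs are below) =====
def Claim_equal_format_hardware_access : Prop := ∀ (hw_accesses : List (List (String × String))), Dom_format_hardware_access hw_accesses → Spec_format_hardware_access hw_accesses (format_hardware_access hw_accesses)

-- ===== LEMMAS AND PROOFS =====

-- proof-only helpers: the dict A's grouping loop builds, and A's outer loop body as a named function
def fhaDict (hw : List (List (String × String))) : PySem.Dict String (List (List (String × String))) :=
  hw.foldl (fun d a => d.modify (fhaRegionKey a) [] (· ++ [a])) PySem.Dict.empty

def fhaStepA (output : List String) (p : String × List (List (String × String))) : List String :=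
  if ((p.2.length : Int) > 10) then
    (PySem.List.slice p.2 none (some 10)).foldl (fun output access => output ++ [fhaAccessLine access])
        (output ++ ["**" ++ p.1 ++ "**:"]) ++
      ["- ... and " ++ PySem.Int.toStr ((p.2.length : Int) - 10) ++ " more accesses\n"]
  else
    (PySem.List.slice p.2 none (some 10)).foldl (fun output access => output ++ [fhaAccessLine access])
        (output ++ ["**" ++ p.1 ++ "**:"]) ++ [""]

-- A's grouping step (insert-[]-if-absent, then append) is exactly Dict.modify
theorem fha_step_eq_modify (d : PySem.Dict String (List (List (String × String))))
    (a : List (String × String)) :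
    (if d.contains (fhaRegionKey a) then d else d.insert (fhaRegionKey a) []).insert
        (fhaRegionKey a)
        ((if d.contains (fhaRegionKey a) then d
          else d.insert (fhaRegionKey a) []).getD (fhaRegionKey a) [] ++ [a])
      = d.modify (fhaRegionKey a) [] (· ++ [a]) := by
  by_cases hc : d.contains (fhaRegionKey a) = true
  · simp [hc]; rfl
  · simp only [Bool.not_eq_true] at hc
    show _ = d.insert (fhaRegionKey a) (d.getD (fhaRegionKey a) [] ++ [a])
    simp [hc, PySem.Dict.getD_insert_self, PySem.Dict.insert_insert_self,
      PySem.Dict.getD_of_not_contains d [] hc]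

-- each group in the dict is the filter of the input by that region key
theorem fha_by_region_getD (hw : List (List (String × String))) (r : String) :
    (fhaDict hw).getD r [] = hw.filter (fun a => fhaRegionKey a == r) := by
  unfold fhaDict
  rw [show (hw.foldl (fun d a => d.modify (fhaRegionKey a) [] (· ++ [a])) PySem.Dict.empty)
      = ((hw.map (fun a => (fhaRegionKey a, a))).foldl
          (fun d p => d.modify p.1 [] (· ++ [p.2])) PySem.Dict.empty) from
    (List.foldl_map (f := fun a => (fhaRegionKey a, a))
      (g := fun d p => d.modify p.1 [] (· ++ [p.2])) (l := hw)
      (init := PySem.Dict.empty)).symm]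
  rw [PySem.Dict.getD_foldl_modify_append]
  simp [List.filter_map, Function.comp_def]

theorem fha_keys (hw : List (List (String × String))) :
    (fhaDict hw).keys = PySem.Set.ofList (hw.map fhaRegionKey) := by
  unfold fhaDict
  rw [PySem.Dict.keys_foldl_modify_key hw fhaRegionKey [] (fun _ a => (· ++ [a])) PySem.Dict.empty]
  rfl

theorem fha_nodup_keys (hw : List (List (String × String))) : (fhaDict hw).keys.Nodup :=
  PySem.Dict.nodup_keys_foldl_modify_key hw fhaRegionKey [] (fun _ a => (· ++ [a]))
    PySem.Dict.empty PySem.Dict.nodup_keys_empty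

-- the sorted items of the dict are the sorted distinct region keys paired with their groups
theorem fha_sorted_items (hw : List (List (String × String))) :
    PySem.List.sorted (fhaDict hw).items (fun p => p.1)
      = (PySem.List.sorted (PySem.Set.ofList (hw.map fhaRegionKey)) (fun r => r)).map
          (fun r => (r, (fhaDict hw).getD r [])) := by
  apply PySem.List.sorted_eq_of_perm_of_pairwise_lt
  · have h1 : (PySem.List.sorted (PySem.Set.ofList (hw.map fhaRegionKey)) (fun r => r)).Perm
        (fhaDict hw).keys := by
      rw [fha_keys]; exact PySem.List.sorted_perm _ _ _
    have h2 := h1.map (fun r => (r, (fhaDict hw).getD r []))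
    rwa [← PySem.Dict.items_eq_map_keys (fhaDict hw) (fha_nodup_keys hw) []] at h2
  · rw [List.pairwise_map]
    have hle := PySem.List.sorted_pairwise (PySem.Set.ofList (hw.map fhaRegionKey)) (fun r => r)
    have hnd : (PySem.List.sorted (PySem.Set.ofList (hw.map fhaRegionKey)) (fun r => r)).Nodup := by
      rw [(PySem.List.sorted_perm _ _ _).nodup_iff]
      exact PySem.Set.nodup_ofList _
    exact (hle.and hnd).imp (fun h => lt_of_le_of_ne h.1 h.2)

-- one pass of A's outer loop emits exactly B's block for that region
theorem fha_step_block (acc : List String) (p : String × List (List (String × String))) :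
    fhaStepA acc p = acc ++ fhaRegionLines p.1 p.2 := by
  unfold fhaStepA fhaRegionLines
  rw [PySem.List.slice_to _ (by norm_num : (0:Int) ≤ (10:Int))]
  rw [show ((10:Int)).toNat = 10 from rfl]
  rw [PySem.List.foldl_append_singleton_eq_map]
  by_cases hlen : ((p.2.length : Int) > 10)
  · rw [if_pos hlen, if_pos (by omega : ((p.2.length : Int) - 10 > 0))]
    simp [List.append_assoc]
  · rw [if_neg hlen, if_neg (by omega : ¬ ((p.2.length : Int) - 10 > 0))]
    simp [List.append_assoc]

-- A's outer loop over the sorted items is B's flatMap over the sorted region keys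
theorem fha_flat (hw : List (List (String × String))) (R : List String) (acc : List String) :
    (R.map (fun r => (r, (fhaDict hw).getD r []))).foldl fhaStepA acc
      = acc ++ R.flatMap (fun r => fhaRegionLines r (hw.filter (fun a => fhaRegionKey a == r))) := by
  induction R generalizing acc with
  | nil => simp
  | cons r R ih =>
    simp only [List.map_cons, List.foldl_cons, List.flatMap_cons]
    rw [fha_step_block, ih]
    simp [fha_by_region_getD, List.append_assoc]

-- ===== VERDICT (by name: the statement is the Claim_ definition above) =====
theorem format_hardware_access_spec : Claim_equal_format_hardware_access := by
  intro hw _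
  show format_hardware_access hw = format_hardware_access_alt hw
  by_cases h : hw = []
  · simp [h, format_hardware_access, format_hardware_access_alt]
  · have hdict : (hw.foldl (fun d access =>
        (if d.contains (PySem.Dict.getD (PySem.Dict.mk access) "region" "UNKNOWN") then d
         else d.insert (PySem.Dict.getD (PySem.Dict.mk access) "region" "UNKNOWN") []).insert
          (PySem.Dict.getD (PySem.Dict.mk access) "region" "UNKNOWN")
          ((if d.contains (PySem.Dict.getD (PySem.Dict.mk access) "region" "UNKNOWN") then d
            else d.insert (PySem.Dict.getD (PySem.Dict.mk access) "region" "UNKNOWN") []).getD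
            (PySem.Dict.getD (PySem.Dict.mk access) "region" "UNKNOWN") [] ++ [access]))
        PySem.Dict.empty) = fhaDict hw :=
      PySem.List.foldl_congr_mem _ _ _ _ (fun acc x _ => fha_step_eq_modify acc x)
    simp only [format_hardware_access, format_hardware_access_alt, if_neg h]
    rw [hdict, fha_sorted_items]
    exact congrArg (PySem.Str.join "\n") (fha_flat hw _ _)
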